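-- pv_equiv track=rewrite | github.com/sid77x/bigdatapracticehub | backend/app/validators/common.py | split_csv_expressions
-- ===== SOURCE A (Python) =====
-- def split_csv_expressions(raw: str) -> list[str]:
--     parts = []
--     chunk = []
--     depth = 0
--     for ch in raw:
--         if ch == "(":
--             depth += 1
--         elif ch == ")" and depth > 0:
--             depth -= 1
--
--         if ch == "," and depth == 0:
--             value = "".join(chunk).strip()
--             if value:
--                 parts.append(value)
--             chunk = []
--             continue
--
--         chunk.append(ch)
--
--     tail = "".join(chunk).strip()
--     if tail:
--         parts.append(tail)
--
--     return parts
-- ===== SOURCE B (Python) =====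
-- def split_csv_expressions(raw: str) -> list[str]:
--     # Pass 1: record indices of top-level commas (paren depth 0).
--     cuts = []
--     depth = 0
--     for i, ch in enumerate(raw):
--         if ch == "(":
--             depth += 1
--         elif ch == ")" and depth > 0:
--             depth -= 1
--         elif ch == "," and depth == 0:
--             cuts.append(i)
--     # Pass 2: slice between boundaries, strip, keep non-empty.
--     parts = []
--     prev = 0
--     for pos in cuts + [len(raw)]:
--         seg = raw[prev:pos].strip()
--         if seg:
--             parts.append(seg)
--         prev = pos + 1
--     return parts
-- ===== Notes on version B (the rewrite author's own statement) =====
-- stated objective: alternative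
-- what changed: Replaces the per-character chunk-accumulation loop by a two-pass boundary scheme: first collect indices of depth-0 commas, then slice the raw string between consecutive boundaries, strip and filter.
import Mathlib
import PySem

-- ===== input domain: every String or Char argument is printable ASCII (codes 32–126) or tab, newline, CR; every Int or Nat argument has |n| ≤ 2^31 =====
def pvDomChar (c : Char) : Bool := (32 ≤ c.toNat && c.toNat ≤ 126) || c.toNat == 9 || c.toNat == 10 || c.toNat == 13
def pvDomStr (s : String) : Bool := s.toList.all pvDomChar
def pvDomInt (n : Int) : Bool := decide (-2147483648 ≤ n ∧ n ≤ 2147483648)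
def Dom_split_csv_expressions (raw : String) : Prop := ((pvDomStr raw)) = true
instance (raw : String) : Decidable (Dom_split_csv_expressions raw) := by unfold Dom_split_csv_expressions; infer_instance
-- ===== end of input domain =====

-- B replaces A's per-character chunk accumulation by two passes: collect the indices of
-- depth-0 commas, then slice the raw string between consecutive boundaries, strip, filter.

-- ===== PORT A =====
-- A's loop body: state (parts, chunk, depth); depth update, then top-level-comma check.
def stepA (st : List String × List Char × Int) (ch : Char) : List String × List Char × Int :=
  let parts := st.1
  let chunk := st.2.1
  let depth := st.2.2
  let depth := if ch = '(' then depth + 1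
               else if ch = ')' ∧ depth > 0 then depth - 1
               else depth
  if ch = ',' ∧ depth = 0 then
    let value := PySem.Chars.strip chunk  -- "".join(chunk).strip()
    (if value ≠ [] then parts ++ [String.ofList value] else parts, [], depth)
  else
    (parts, chunk ++ [ch], depth)

def split_csv_expressions (raw : String) : List String :=
  let st := raw.toList.foldl stepA ([], [], 0)
  let tail := PySem.Chars.strip st.2.1
  if tail ≠ [] then st.1 ++ [String.ofList tail] else st.1

-- ===== PORT B =====
-- B pass 1 body: state (depth, cuts); record index of each comma seen at depth 0.
def stepB1 (st : Int × List Int) (p : Int × Char) : Int × List Int :=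
  if p.2 = '(' then (st.1 + 1, st.2)
  else if p.2 = ')' ∧ st.1 > 0 then (st.1 - 1, st.2)
  else if p.2 = ',' ∧ st.1 = 0 then (st.1, st.2 ++ [p.1])
  else st

-- B pass 2 body: state (prev, parts); seg = raw[prev:pos].strip(), kept if non-empty.
def stepB2 (cs : List Char) (st : Int × List String) (pos : Int) : Int × List String :=
  let seg := PySem.Chars.strip (PySem.List.slice cs (some st.1) (some pos))
  (pos + 1, if seg ≠ [] then st.2 ++ [String.ofList seg] else st.2)

def split_csv_expressions_alt (raw : String) : List String :=
  let cs := raw.toList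
  let p1 := (PySem.List.enumerate cs).foldl stepB1 (0, [])
  let cuts := p1.2
  ((cuts ++ [(cs.length : Int)]).foldl (stepB2 cs) (0, [])).2

-- ===== PRECONDITION & SPEC =====
def Spec_split_csv_expressions (raw : String) (out : List String) : Prop := out = split_csv_expressions_alt raw
instance (raw : String) (out : List String) : Decidable (Spec_split_csv_expressions raw out) := by unfold Spec_split_csv_expressions; infer_instance

-- ===== CLAIM (what is proved, stated in full; the proofs are below) =====
def Claim_equal_split_csv_expressions : Prop := ∀ (raw : String), Dom_split_csv_expressions raw → Spec_split_csv_expressions raw (split_csv_expressions raw)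

-- ===== LEMMAS AND PROOFS =====

-- Common depth update (both programs use the same rule).
def pvUpd (d : Int) (c : Char) : Int :=
  if c = '(' then d + 1 else if c = ')' ∧ d > 0 then d - 1 else d

-- Reference segmentation: raw segments between top-level commas, in order.
def pvSegs : List Char → Int → List (List Char)
  | [], _ => [[]]
  | c :: cs, d =>
    let d' := pvUpd d c
    if c = ',' ∧ d' = 0 then [] :: pvSegs cs d'
    else (pvSegs cs d').modifyHead (fun s => c :: s)

def pvPack1 (s : List Char) : List String :=
  if PySem.Chars.strip s ≠ [] then [String.ofList (PySem.Chars.strip s)] else []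

def pvPack (L : List (List Char)) : List String := L.flatMap pvPack1

-- Indices of top-level commas, counting from i.
def pvCuts : List Char → Int → Int → List Int
  | [], _, _ => []
  | c :: cs, i, d =>
    let d' := pvUpd d c
    if c = ',' ∧ d' = 0 then i :: pvCuts cs (i + 1) d' else pvCuts cs (i + 1) d'

def pvFinalD : List Char → Int → Int
  | [], d => d
  | c :: cs, d => pvFinalD cs (pvUpd d c)

-- Segments cut out of the full list by a list of boundary positions.
def pvSegsOf (full : List Char) : Int → List Int → List (List Char)
  | _, [] => []
  | prev, p :: ps => PySem.List.slice full (some prev) (some p) :: pvSegsOf full (p + 1) ps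

lemma modifyHead_nil_append (L : List (List Char)) :
    L.modifyHead (fun s => [] ++ s) = L := by cases L <;> simp

lemma modifyHead_comp (c : Char) (chunk : List Char) (L : List (List Char)) :
    (L.modifyHead (fun s => c :: s)).modifyHead (fun s => chunk ++ s)
      = L.modifyHead (fun s => (chunk ++ [c]) ++ s) := by
  cases L <;> simp

-- A's fold-with-finish, characterised by pvSegs.
lemma runA (cs : List Char) :
    ∀ (parts : List String) (chunk : List Char) (d : Int),
      (if PySem.Chars.strip ((cs.foldl stepA (parts, chunk, d)).2.1) ≠ [] then
         (cs.foldl stepA (parts, chunk, d)).1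
           ++ [String.ofList (PySem.Chars.strip ((cs.foldl stepA (parts, chunk, d)).2.1))]
       else (cs.foldl stepA (parts, chunk, d)).1)
      = parts ++ pvPack ((pvSegs cs d).modifyHead (fun s => chunk ++ s)) := by
  induction cs with
  | nil =>
    intro parts chunk d
    simp only [List.foldl_nil, pvSegs, List.modifyHead_cons, pvPack, List.flatMap_cons,
      List.flatMap_nil, pvPack1, List.append_nil]
    split_ifs <;> simp_all
  | cons c cs ih =>
    intro parts chunk d
    simp only [List.foldl_cons]
    by_cases hc : c = ',' ∧ pvUpd d c = 0
    · have hstep : stepA (parts, chunk, d) c = (parts ++ pvPack1 chunk, [], pvUpd d c) := by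
        simp only [stepA, pvUpd, pvPack1]
        rw [if_pos (by simpa [pvUpd] using hc)]
        split_ifs <;> simp_all
      rw [hstep, ih, modifyHead_nil_append]
      simp only [pvSegs]
      rw [if_pos hc]
      simp [pvPack, pvPack1]
    · have hstep : stepA (parts, chunk, d) c = (parts, chunk ++ [c], pvUpd d c) := by
        simp only [stepA, pvUpd]
        rw [if_neg (by simpa [pvUpd] using hc)]
      rw [hstep, ih]
      simp only [pvSegs]
      rw [if_neg hc, ← modifyHead_comp]

-- B's first pass, characterised by pvCuts.
lemma runB1 (cs : List Char) :
    ∀ (s d : Int) (acc : List Int),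
      (PySem.List.enumerate cs s).foldl stepB1 (d, acc)
        = (pvFinalD cs d, acc ++ pvCuts cs s d) := by
  induction cs with
  | nil => intro s d acc; simp [PySem.List.enumerate_nil, pvFinalD, pvCuts]
  | cons c cs ih =>
    intro s d acc
    rw [PySem.List.enumerate_cons, List.foldl_cons]
    have hstep : stepB1 (d, acc) (s, c)
        = (pvUpd d c, acc ++ if c = ',' ∧ pvUpd d c = 0 then [s] else []) := by
      simp only [stepB1, pvUpd]
      split_ifs <;> simp_all
    rw [hstep, ih]
    simp only [pvFinalD, pvCuts]
    split_ifs <;> simp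

-- B's second pass, characterised by pvSegsOf.
lemma runB2 (cs : List Char) (ps : List Int) :
    ∀ (prev : Int) (parts : List String),
      ((ps.foldl (stepB2 cs) (prev, parts)).2)
        = parts ++ pvPack (pvSegsOf cs prev ps) := by
  induction ps with
  | nil => intro prev parts; simp [pvSegsOf, pvPack]
  | cons p ps ih =>
    intro prev parts
    rw [List.foldl_cons]
    have hstep : stepB2 cs (prev, parts) p
        = (p + 1, if PySem.Chars.strip (PySem.List.slice cs (some prev) (some p)) ≠ [] then
            parts ++ [String.ofList (PySem.Chars.strip (PySem.List.slice cs (some prev) (some p)))]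
          else parts) := rfl
    rw [hstep, ih]
    simp only [pvSegsOf, pvPack, List.flatMap_cons, pvPack1]
    split_ifs <;> simp

lemma cuts_lb (cs : List Char) :
    ∀ (i d x : Int), x ∈ pvCuts cs i d → i ≤ x := by
  induction cs with
  | nil => intro i d x h; simp [pvCuts] at h
  | cons c cs ih =>
    intro i d x h
    simp only [pvCuts] at h
    split_ifs at h with hc
    · rcases List.mem_cons.mp h with rfl | h
      · omega
      · have := ih (i + 1) (pvUpd d c) x h; omega
    · have := ih (i + 1) (pvUpd d c) x h; omega

-- Slicing one char off the front of a segment.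
lemma slice_cons_split (pre cs : List Char) (c : Char) (p : Int)
    (hp : (pre.length : Int) + 1 ≤ p) :
    PySem.List.slice (pre ++ c :: cs) (some (pre.length : Int)) (some p)
      = c :: PySem.List.slice (pre ++ c :: cs) (some ((pre.length : Int) + 1)) (some p) := by
  have h0 : (0 : Int) ≤ (pre.length : Int) := by positivity
  have h1 : (0 : Int) ≤ (pre.length : Int) + 1 := by omega
  have h2 : (0 : Int) ≤ p := by omega
  rw [PySem.List.slice_toNat (pre ++ c :: cs) h0 h2,
      PySem.List.slice_toNat (pre ++ c :: cs) h1 h2]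
  have e1 : ((pre.length : Int)).toNat = pre.length := by omega
  have e2 : ((pre.length : Int) + 1).toNat = pre.length + 1 := by omega
  rw [e1, e2]
  have d1 : (pre ++ c :: cs).drop pre.length = c :: cs := List.drop_left
  have d2 : (pre ++ c :: cs).drop (pre.length + 1) = cs := by
    have h3 : pre ++ c :: cs = (pre ++ [c]) ++ cs := by simp
    have h4 : pre.length + 1 = (pre ++ [c]).length := by simp
    rw [h3, h4]
    exact List.drop_left
  rw [d1, d2]
  have hk : p.toNat - pre.length = (p.toNat - (pre.length + 1)) + 1 := by omega
  rw [hk, List.take_succ_cons]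

lemma segsOf_shift (pre cs : List Char) (c : Char) (ps : List Int)
    (hps : ps ≠ [])
    (hmem : ∀ x ∈ ps, (pre.length : Int) + 1 ≤ x) :
    pvSegsOf (pre ++ c :: cs) (pre.length : Int) ps
      = (pvSegsOf (pre ++ c :: cs) ((pre.length : Int) + 1) ps).modifyHead (fun s => c :: s) := by
  cases ps with
  | nil => exact absurd rfl hps
  | cons p ps =>
    have hp : (pre.length : Int) + 1 ≤ p := hmem p (List.mem_cons_self ..)
    simp only [pvSegsOf, List.modifyHead_cons]
    rw [slice_cons_split pre cs c p hp]

-- Main lemma: boundary slicing reproduces the reference segmentation.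
lemma main_segs (cs : List Char) :
    ∀ (pre : List Char) (d : Int),
      pvSegsOf (pre ++ cs) (pre.length : Int)
          (pvCuts cs (pre.length : Int) d ++ [((pre ++ cs).length : Int)])
        = pvSegs cs d := by
  induction cs with
  | nil =>
    intro pre d
    simp only [pvCuts, pvSegs, List.nil_append, List.append_nil, pvSegsOf]
    have h0 : (0 : Int) ≤ (pre.length : Int) := by positivity
    rw [PySem.List.slice_toNat pre h0 h0]
    simp
  | cons c cs ih =>
    intro pre d
    have hlen : (((pre ++ [c]).length : Nat) : Int) = (pre.length : Int) + 1 := by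
      simp
    simp only [pvCuts, pvSegs]
    by_cases hc : c = ',' ∧ pvUpd d c = 0
    · rw [if_pos hc, if_pos hc]
      simp only [List.cons_append, pvSegsOf]
      have h0 : (0 : Int) ≤ (pre.length : Int) := by positivity
      rw [PySem.List.slice_toNat (pre ++ c :: cs) h0 h0]
      have ihx := ih (pre ++ [c]) (pvUpd d c)
      rw [hlen] at ihx
      have hfull2 : (pre ++ [c]) ++ cs = pre ++ c :: cs := by simp
      rw [hfull2] at ihx
      rw [ihx]
      simp
    · rw [if_neg hc, if_neg hc]
      have ihx := ih (pre ++ [c]) (pvUpd d c)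
      rw [hlen] at ihx
      have hfull2 : (pre ++ [c]) ++ cs = pre ++ c :: cs := by simp
      rw [hfull2] at ihx
      rw [segsOf_shift pre cs c _ (by simp) ?hmem, ihx]
      case hmem =>
        intro x hx
        rcases List.mem_append.mp hx with h | h
        · exact cuts_lb cs _ _ x h
        · simp only [List.mem_singleton] at h
          subst h
          simp only [List.length_append, List.length_cons]
          push_cast
          omega

-- ===== VERDICT (by name: the statement is the Claim_ definition above) =====
theorem split_csv_expressions_spec : Claim_equal_split_csv_expressions := by
  intro raw _
  show split_csv_expressions raw = split_csv_expressions_alt raw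
  have hA : split_csv_expressions raw =
      (if PySem.Chars.strip ((raw.toList.foldl stepA ([], [], 0)).2.1) ≠ [] then
         (raw.toList.foldl stepA ([], [], 0)).1
           ++ [String.ofList (PySem.Chars.strip ((raw.toList.foldl stepA ([], [], 0)).2.1))]
       else (raw.toList.foldl stepA ([], [], 0)).1) := rfl
  have hB : split_csv_expressions_alt raw =
      (((((PySem.List.enumerate raw.toList).foldl stepB1 (0, [])).2)
          ++ [(raw.toList.length : Int)]).foldl (stepB2 raw.toList) (0, [])).2 := rfl
  rw [hA, hB, runA raw.toList [] [] 0, modifyHead_nil_append, runB1 raw.toList 0 0 []]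
  simp only [List.nil_append]
  rw [runB2]
  have hm := main_segs raw.toList [] 0
  simp only [List.nil_append, List.length_nil, Nat.cast_zero] at hm
  rw [hm]
  simp
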